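-- pv_equiv track=rewrite | github.com/takuto-oono/Atcoder | D-Grid_Cloring.py | determine_color
-- ===== SOURCE A (Python) =====
-- def determine_color(C, h, w, A):
--     k = 0
--     for i in range(h):
--         if i % 2 == 0:
--             for j in range(w):
--                 C[i][j] = k + 1
--                 A[k] -= 1
--                 if A[k] <= 0:
--                     k += 1
--
--             continue
--
--         if i % 2 == 1:
--             for j in range(w):
--                 C[i][w - j - 1] = k + 1
--                 A[k] -= 1
--                 if A[k] <= 0:
--                     k += 1
--
--             continue
--
--     return C
-- ===== SOURCE B (Python) =====
-- def determine_color(C, h, w, A):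
--     # Two passes: generate the flat color sequence by consuming A's counts,
--     # then place each color by index arithmetic (cell p lives in row p // w,
--     # walking right-to-left on odd rows).
--     k = 0
--     seq = []
--     for _ in range(h * w):
--         seq.append(k + 1)
--         A[k] -= 1
--         if A[k] <= 0:
--             k += 1
--     for p, color in enumerate(seq):
--         i, j = divmod(p, w)
--         col = j if i % 2 == 0 else w - 1 - j
--         C[i][col] = color
--     return C
-- ===== Notes on version B (the rewrite author's own statement) =====
-- stated objective: alternative
-- what changed: Replaces the parity-branched nested snake loops by two flat passes: first generate the color for every one of the h*w cells by consuming A's counts, then place each color by index arithmetic (i, j = divmod(p, w), column mirrored on odd rows); Pre_ excludes the inputs where A raises IndexError and the degenerate corner where both dimensions are negative (there A's empty row range returns C untouched while B's positive cell count h*w is nonsense, so B raises or paints cells).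
-- outside the precondition, e.g. on determine_color([[7]], -1, -1, [3]): A returns [[7]], B returns [[1]]
import Mathlib
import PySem

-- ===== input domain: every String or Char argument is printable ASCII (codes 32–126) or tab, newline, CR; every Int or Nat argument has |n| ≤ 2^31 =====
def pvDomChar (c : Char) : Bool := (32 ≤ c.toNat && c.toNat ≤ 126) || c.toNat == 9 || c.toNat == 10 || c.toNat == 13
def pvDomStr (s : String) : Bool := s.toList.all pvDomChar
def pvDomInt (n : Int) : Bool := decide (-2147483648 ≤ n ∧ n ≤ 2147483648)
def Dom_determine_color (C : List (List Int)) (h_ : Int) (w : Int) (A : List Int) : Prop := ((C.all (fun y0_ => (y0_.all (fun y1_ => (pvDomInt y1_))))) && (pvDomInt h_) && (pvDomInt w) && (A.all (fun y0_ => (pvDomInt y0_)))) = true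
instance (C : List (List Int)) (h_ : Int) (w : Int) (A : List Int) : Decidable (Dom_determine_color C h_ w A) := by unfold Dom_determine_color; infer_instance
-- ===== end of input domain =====

-- B replaces the parity-branched nested snake loops by two flat passes: generate the
-- color sequence for all h*w cells by consuming A's counts, then place each color by
-- index arithmetic (divmod). On the natural domain B performs the same in-place updates
-- of C and A as A does; the theorem proved here is about the RETURN value.

-- ===== PORT A =====
-- one snake step: write color k+1 into C[i][col], decrement A[k], advance k if exhausted
def dcStep (i : Nat) (col : Nat) (st : List (List Int) × List Int × Nat) :
    List (List Int) × List Int × Nat :=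
  let C := st.1
  let A := st.2.1
  let k := st.2.2
  let C' := C.set i ((C.getD i []).set col ((k : Int) + 1))
  let A' := A.set k (A.getD k 0 - 1)
  let k' := if A'.getD k 0 ≤ 0 then k + 1 else k
  (C', A', k')

def determine_color (C : List (List Int)) (h_ : Int) (w : Int) (A : List Int) :
    List (List Int) :=
  ((PySem.List.pyRange 0 h_ 1).foldl (fun st i =>
      if i % 2 == 0 then
        (PySem.List.pyRange 0 w 1).foldl (fun st j => dcStep i.toNat j.toNat st) st
      else if i % 2 == 1 then
        (PySem.List.pyRange 0 w 1).foldl (fun st j => dcStep i.toNat (w - j - 1).toNat st) st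
      else st) (C, A, 0)).1

-- ===== PORT B =====
-- Python list assignment G[i][col] = v: negative indices wrap around; where Python
-- raises IndexError (index out of range) the grid is returned unchanged — those
-- executions are excluded by Pre_ (Python raised, nothing to compare).
def pySet2 (G : List (List Int)) (i col v : Int) : List (List Int) :=
  let i' := if i < 0 then i + G.length else i
  if 0 ≤ i' ∧ i' < G.length then
    let row := G.getD i'.toNat []
    let col' := if col < 0 then col + row.length else col
    if 0 ≤ col' ∧ col' < row.length then G.set i'.toNat (row.set col'.toNat v) else G
  else G

-- first loop of Source B: seq.append(k + 1); A[k] -= 1; advance k when exhausted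
def genStep (st : List Int × List Int × Nat) : List Int × List Int × Nat :=
  let seq := st.1
  let A := st.2.1
  let k := st.2.2
  let A' := A.set k (A.getD k 0 - 1)
  (seq ++ [(k : Int) + 1], A', if A'.getD k 0 ≤ 0 then k + 1 else k)

-- second loop of Source B: i, j = divmod(p, w); col = j or w-1-j; C[i][col] = color
def plStep (w : Int) (G : List (List Int)) (p : Int × Int) : List (List Int) :=
  let i := PySem.Int.floordiv p.1 w
  let j := PySem.Int.mod p.1 w
  let col := if i % 2 == 0 then j else w - 1 - j
  pySet2 G i col p.2

def determine_color_alt (C : List (List Int)) (h_ : Int) (w : Int) (A : List Int) :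
    List (List Int) :=
  let seq := ((PySem.List.pyRange 0 (h_ * w) 1).foldl (fun st _ => genStep st) ([], A, 0)).1
  (PySem.List.enumerate seq 0).foldl (plStep w) C

-- ===== PRECONDITION & SPEC =====
-- Pre_ is where A returns normally MINUS one degenerate corner: it excludes the inputs
-- where A raises IndexError (grid smaller than h rows of w cells, or colors exhausted
-- before h*w cells: one cell is consumed per nonpositive count, max(a,1) per color), and
-- it excludes the corner where BOTH dimensions are negative — there A's empty row range
-- returns C untouched while B's positive cell count h*w is nonsense, so B raises or
-- paints; neither behaviour is specified for negative dimensions.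
def Pre_determine_color (C : List (List Int)) (h_ : Int) (w : Int) (A : List Int) : Prop :=
  (0 ≤ h_ ∨ 0 ≤ w) ∧
  (0 < h_ → 0 < w →
    h_.toNat ≤ C.length ∧ (∀ row ∈ C.take h_.toNat, w.toNat ≤ row.length) ∧
      h_ * w ≤ (A.map (fun a => max a 1)).sum)

instance (C : List (List Int)) (h_ : Int) (w : Int) (A : List Int) :
    Decidable (Pre_determine_color C h_ w A) := by unfold Pre_determine_color; infer_instance

def pvWitness_determine_color : List (List Int) × Int × Int × List Int :=
  ([[0, 0], [0, 0]], 2, 2, [3, 1])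

def Spec_determine_color (C : List (List Int)) (h_ : Int) (w : Int) (A : List Int) (out : List (List Int)) : Prop := out = determine_color_alt C h_ w A
instance (C : List (List Int)) (h_ : Int) (w : Int) (A : List Int) (out : List (List Int)) : Decidable (Spec_determine_color C h_ w A out) := by unfold Spec_determine_color; infer_instance

-- ===== CLAIM (what is proved, stated in full; the proofs are below) =====
def Claim_equal_determine_color : Prop := ∀ (C : List (List Int)) (h_ : Int) (w : Int) (A : List Int), Dom_determine_color C h_ w A → Pre_determine_color C h_ w A → Spec_determine_color C h_ w A (determine_color C h_ w A)

-- ===== LEMMAS AND PROOFS =====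

-- abstract per-cell color process: state (k, remaining suffix of A from position k)
def pstep : Nat × List Int → Nat × List Int
  | (k, []) => (k + 1, [])
  | (k, a :: rest) => if a - 1 ≤ 0 then (k + 1, rest) else (k, (a - 1) :: rest)

def stream : Nat × List Int → Nat → List Int
  | _, 0 => []
  | s, n + 1 => ((s.1 : Int) + 1) :: stream (pstep s) n

def afterS : Nat × List Int → Nat → Nat × List Int
  | s, 0 => s
  | s, n + 1 => afterS (pstep s) n

theorem getD_of_lt {α : Type} (l : List α) (k : Nat) (d : α) (h : k < l.length) :
    l.getD k d = l[k] := by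
  simp [List.getD_eq_getElem?_getD, List.getElem?_eq_getElem h]

theorem getD_of_ge {α : Type} (l : List α) (k : Nat) (d : α) (h : l.length ≤ k) :
    l.getD k d = d := by
  simp [List.getD_eq_getElem?_getD, List.getElem?_eq_none h]

theorem stream_length (s : Nat × List Int) (n : Nat) : (stream s n).length = n := by
  induction n generalizing s with
  | zero => rfl
  | succ n ih => simp [stream, ih]

theorem afterS_succ_right (s : Nat × List Int) (n : Nat) :
    afterS s (n + 1) = pstep (afterS s n) := by
  induction n generalizing s with
  | zero => rfl
  | succ n ih => exact ih (pstep s)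

theorem stream_succ_right (s : Nat × List Int) (n : Nat) :
    stream s (n + 1) = stream s n ++ [((afterS s n).1 : Int) + 1] := by
  induction n generalizing s with
  | zero => rfl
  | succ n ih =>
    show ((s.1 : Int) + 1) :: stream (pstep s) (n + 1) = _
    rw [ih (pstep s)]
    rfl

theorem afterS_add (s : Nat × List Int) (m n : Nat) :
    afterS s (m + n) = afterS (afterS s m) n := by
  induction n with
  | zero => rfl
  | succ n ih =>
    rw [show m + (n + 1) = (m + n) + 1 from rfl, afterS_succ_right, ih, ← afterS_succ_right]

theorem stream_add (s : Nat × List Int) (m n : Nat) :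
    stream s (m + n) = stream s m ++ stream (afterS s m) n := by
  induction n with
  | zero => simp [stream]
  | succ n ih =>
    rw [show m + (n + 1) = (m + n) + 1 from rfl, stream_succ_right, ih,
      stream_succ_right, afterS_add, List.append_assoc]

-- port A's (A,k) update corresponds to one pstep on (k, A.drop k)
theorem step_corr (A : List Int) (k : Nat) :
    ((if (A.set k (A.getD k 0 - 1)).getD k 0 ≤ 0 then k + 1 else k)
        = (pstep (k, A.drop k)).1) ∧
    (A.set k (A.getD k 0 - 1)).drop (pstep (k, A.drop k)).1 = (pstep (k, A.drop k)).2 := by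
  by_cases hk : k < A.length
  · have hd : A.drop k = A[k] :: A.drop (k + 1) := List.drop_eq_getElem_cons hk
    have hgetD : A.getD k 0 = A[k] := getD_of_lt A k 0 hk
    have hset : (A.set k (A.getD k 0 - 1)).getD k 0 = A[k] - 1 := by
      rw [getD_of_lt _ k 0 (by simpa using hk), List.getElem_set_self, hgetD]
    have hdropset : ∀ v : Int, (A.set k v).drop (k + 1) = A.drop (k + 1) := by
      intro v; rw [List.drop_set]; simp
    by_cases hle : A[k] - 1 ≤ 0
    · have hps : pstep (k, A.drop k) = (k + 1, A.drop (k + 1)) := by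
        rw [hd]; simp [pstep, hle]
      refine ⟨?_, ?_⟩
      · rw [hset, if_pos hle, hps]
      · rw [hps, hgetD, hdropset]
    · have hps : pstep (k, A.drop k) = (k, (A[k] - 1) :: A.drop (k + 1)) := by
        rw [hd]; simp [pstep, hle]
      refine ⟨?_, ?_⟩
      · rw [hset, if_neg hle, hps]
      · rw [hps]
        have hk' : k < (A.set k (A.getD k 0 - 1)).length := by simpa using hk
        rw [List.drop_eq_getElem_cons hk', hdropset, List.getElem_set_self, hgetD]
  · have hd : A.drop k = [] := List.drop_eq_nil_of_le (by omega)
    have hset : A.set k (A.getD k 0 - 1) = A := List.set_eq_of_length_le (by omega)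
    have hgetD : A.getD k 0 = 0 := getD_of_ge A k 0 (by omega)
    have hps : pstep (k, A.drop k) = (k + 1, []) := by rw [hd]; rfl
    refine ⟨?_, ?_⟩
    · rw [hset, hgetD, if_pos (by omega), hps]
    · rw [hset, hps]
      exact List.drop_eq_nil_of_le (by omega)

-- even row: n left-to-right writes starting at column 0
theorem innerE (i : Nat) (C : List (List Int)) (n : Nat) :
    ∀ (A : List Int) (k : Nat), i < C.length → n ≤ (C.getD i []).length →
    ∃ A', (List.range n).foldl (fun st jj => dcStep i jj st) (C, A, k)
        = (C.set i (stream (k, A.drop k) n ++ (C.getD i []).drop n), A',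
           (afterS (k, A.drop k) n).1)
      ∧ A'.drop (afterS (k, A.drop k) n).1 = (afterS (k, A.drop k) n).2 := by
  induction n with
  | zero =>
    intro A k hi _
    refine ⟨A, ?_, rfl⟩
    have h1 : C.getD i [] = C[i] := getD_of_lt C i [] hi
    rw [h1]
    simp [stream, afterS]
  | succ n ih =>
    intro A k hi hrow
    obtain ⟨A₁, hfold, hdrop⟩ := ih A k hi (by omega)
    rw [List.range_succ, List.foldl_append, hfold]
    set σ := (k, A.drop k)
    have hrowlen : n < (C.getD i []).length := by omega
    have hgetD1 : (C.set i (stream σ n ++ (C.getD i []).drop n)).getD i []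
        = stream σ n ++ (C.getD i []).drop n := by
      rw [getD_of_lt _ i [] (by simpa using hi)]
      simp
    have hpair : (((afterS σ n).1 : Nat), A₁.drop (afterS σ n).1) = afterS σ n := by
      rw [hdrop]
    obtain ⟨hk2, hd2⟩ := step_corr A₁ (afterS σ n).1
    rw [hpair] at hk2 hd2
    refine ⟨A₁.set (afterS σ n).1 (A₁.getD (afterS σ n).1 0 - 1), ?_, ?_⟩
    · simp only [List.foldl_cons, List.foldl_nil, dcStep, hgetD1]
      rw [List.set_set]
      have hsetrow : (stream σ n ++ (C.getD i []).drop n).set n (((afterS σ n).1 : Int) + 1)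
          = stream σ (n + 1) ++ (C.getD i []).drop (n + 1) := by
        rw [List.set_append_right _ _ (by simp [stream_length]), stream_length, Nat.sub_self,
          List.drop_eq_getElem_cons hrowlen]
        simp only [List.set_cons_zero]
        rw [stream_succ_right, List.append_assoc, List.singleton_append]
      rw [hsetrow, hk2, ← afterS_succ_right]
    · rw [afterS_succ_right]
      exact hd2

-- odd row: t right-to-left writes, columns wn-1 down to wn-t
theorem innerO (i : Nat) (C : List (List Int)) (wn : Nat) (t : Nat) :
    ∀ (A : List Int) (k : Nat), t ≤ wn → i < C.length → wn ≤ (C.getD i []).length →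
    ∃ A', (List.range t).foldl (fun st jj => dcStep i (wn - jj - 1) st) (C, A, k)
        = (C.set i ((C.getD i []).take (wn - t) ++ (stream (k, A.drop k) t).reverse
             ++ (C.getD i []).drop wn), A',
           (afterS (k, A.drop k) t).1)
      ∧ A'.drop (afterS (k, A.drop k) t).1 = (afterS (k, A.drop k) t).2 := by
  induction t with
  | zero =>
    intro A k _ hi _
    refine ⟨A, ?_, rfl⟩
    have h1 : C.getD i [] = C[i] := getD_of_lt C i [] hi
    rw [h1]
    simp [stream, afterS]
  | succ t ih =>
    intro A k ht hi hrow
    obtain ⟨A₁, hfold, hdrop⟩ := ih A k (by omega) hi hrow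
    rw [List.range_succ, List.foldl_append, hfold]
    set σ := (k, A.drop k)
    set row := C.getD i [] with hrowdef
    have hgetD1 : (C.set i (row.take (wn - t) ++ (stream σ t).reverse ++ row.drop wn)).getD i []
        = row.take (wn - t) ++ (stream σ t).reverse ++ row.drop wn := by
      rw [getD_of_lt _ i [] (by simpa using hi)]
      simp
    have hpair : (((afterS σ t).1 : Nat), A₁.drop (afterS σ t).1) = afterS σ t := by
      rw [hdrop]
    obtain ⟨hk2, hd2⟩ := step_corr A₁ (afterS σ t).1
    rw [hpair] at hk2 hd2
    refine ⟨A₁.set (afterS σ t).1 (A₁.getD (afterS σ t).1 0 - 1), ?_, ?_⟩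
    · simp only [List.foldl_cons, List.foldl_nil, dcStep, hgetD1]
      rw [List.set_set]
      have hlen_take : (row.take (wn - t)).length = wn - t := by
        rw [List.length_take]; omega
      have hcol : wn - t - 1 < (row.take (wn - t)).length := by rw [hlen_take]; omega
      have hidx : wn - t - 1 < row.length := by omega
      have hsetrow : (row.take (wn - t) ++ (stream σ t).reverse ++ row.drop wn).set
            (wn - t - 1) (((afterS σ t).1 : Int) + 1)
          = row.take (wn - (t + 1)) ++ (stream σ (t + 1)).reverse ++ row.drop wn := by
        rw [List.append_assoc, List.set_append_left _ _ hcol]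
        have htk : row.take (wn - t) = row.take (wn - t - 1) ++ [row[wn - t - 1]] := by
          have h1 := List.take_succ_eq_append_getElem (l := row) (i := wn - t - 1) hidx
          rw [show wn - t - 1 + 1 = wn - t from by omega] at h1
          exact h1
        rw [htk, List.set_append_right _ _ (by rw [List.length_take]; omega),
          show wn - t - 1 - (row.take (wn - t - 1)).length = 0 from by
            rw [List.length_take]; omega]
        simp only [List.set_cons_zero]
        rw [stream_succ_right, List.reverse_append, List.reverse_singleton]
        simp [List.append_assoc, Nat.sub_sub]
      rw [hsetrow, hk2, ← afterS_succ_right]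
    · rw [afterS_succ_right]
      exact hd2

-- the target grid: first m rows replaced by the snake rows
def rowT (C : List (List Int)) (wn : Nat) (A : List Int) (p : Nat) : List Int :=
  (if p % 2 = 0 then stream (afterS (0, A) (p * wn)) wn
   else (stream (afterS (0, A) (p * wn)) wn).reverse) ++ (C.getD p []).drop wn

def gridT (C : List (List Int)) (wn : Nat) (A : List Int) (m : Nat) : List (List Int) :=
  (List.range m).foldl (fun G p => G.set p (rowT C wn A p)) C

theorem gridT_succ (C : List (List Int)) (wn : Nat) (A : List Int) (m : Nat) :
    gridT C wn A (m + 1) = (gridT C wn A m).set m (rowT C wn A m) := by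
  unfold gridT; rw [List.range_succ, List.foldl_append]; rfl

theorem gridT_length (C : List (List Int)) (wn : Nat) (A : List Int) (m : Nat) :
    (gridT C wn A m).length = C.length := by
  induction m with
  | zero => rfl
  | succ m ih => rw [gridT_succ]; simp [ih]

theorem gridT_getD_ge (C : List (List Int)) (wn : Nat) (A : List Int) (m p : Nat)
    (h : m ≤ p) : (gridT C wn A m).getD p [] = C.getD p [] := by
  induction m with
  | zero => rfl
  | succ m ih =>
    rw [gridT_succ, List.getD_eq_getElem?_getD, List.getElem?_set_ne (by omega),
      ← List.getD_eq_getElem?_getD, ih (by omega)]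

-- the outer snake loop in Nat form
def stepN (wn : Nat) (st : List (List Int) × List Int × Nat) (p : Nat) :
    List (List Int) × List Int × Nat :=
  if p % 2 = 0 then (List.range wn).foldl (fun st jj => dcStep p jj st) st
  else (List.range wn).foldl (fun st jj => dcStep p (wn - jj - 1) st) st

theorem outerInv (C : List (List Int)) (wn hn : Nat) (A : List Int)
    (hC : hn ≤ C.length) (hrow : ∀ p, p < hn → wn ≤ (C.getD p []).length) :
    ∀ m, m ≤ hn →
    ∃ A', (List.range m).foldl (stepN wn) (C, A, 0)
        = (gridT C wn A m, A', (afterS (0, A) (m * wn)).1)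
      ∧ A'.drop (afterS (0, A) (m * wn)).1 = (afterS (0, A) (m * wn)).2 := by
  intro m
  induction m with
  | zero =>
    intro _
    refine ⟨A, ?_, ?_⟩ <;> simp [gridT, afterS]
  | succ m ih =>
    intro hm
    obtain ⟨A₁, hfold, hdrop⟩ := ih (by omega)
    rw [List.range_succ, List.foldl_append, hfold]
    simp only [List.foldl_cons, List.foldl_nil]
    have hiG : m < (gridT C wn A m).length := by rw [gridT_length]; omega
    have hgd : (gridT C wn A m).getD m [] = C.getD m [] := gridT_getD_ge C wn A m m le_rfl
    have hrowG : wn ≤ ((gridT C wn A m).getD m []).length := by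
      rw [hgd]; exact hrow m (by omega)
    have hpair : (((afterS (0, A) (m * wn)).1 : Nat), A₁.drop (afterS (0, A) (m * wn)).1)
        = afterS (0, A) (m * wn) := by rw [hdrop]
    have hadd : afterS (afterS (0, A) (m * wn)) wn = afterS (0, A) ((m + 1) * wn) := by
      rw [← afterS_add, ← Nat.succ_mul]
    by_cases hpar : m % 2 = 0
    · obtain ⟨A₂, hfold2, hdrop2⟩ := innerE m (gridT C wn A m) wn A₁
        (afterS (0, A) (m * wn)).1 hiG hrowG
      refine ⟨A₂, ?_, ?_⟩
      · rw [stepN, if_pos hpar, hfold2, hpair, hadd, gridT_succ]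
        congr 2
        rw [rowT, if_pos hpar, hgd]
      · rw [hpair, hadd] at hdrop2; exact hdrop2
    · obtain ⟨A₂, hfold2, hdrop2⟩ := innerO m (gridT C wn A m) wn wn A₁
        (afterS (0, A) (m * wn)).1 le_rfl hiG hrowG
      refine ⟨A₂, ?_, ?_⟩
      · rw [stepN, if_neg hpar, hfold2, hpair, hadd, gridT_succ]
        congr 2
        rw [rowT, if_neg hpar, hgd, Nat.sub_self, List.take_zero, List.nil_append]
      · rw [hpair, hadd] at hdrop2; exact hdrop2

-- port A computes the target grid (positive case)
theorem portA_eq (C : List (List Int)) (h_ w : Int) (A : List Int)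
    (hh : 0 < h_) (hw : 0 < w)
    (hC : h_.toNat ≤ C.length) (hrow : ∀ p, p < h_.toNat → w.toNat ≤ (C.getD p []).length) :
    determine_color C h_ w A = gridT C w.toNat A h_.toNat := by
  obtain ⟨A', hfold, -⟩ := outerInv C w.toNat h_.toNat A hC hrow h_.toNat le_rfl
  unfold determine_color
  rw [PySem.List.pyRange_one 0 h_]
  simp only [Int.sub_zero]
  rw [List.foldl_map]
  have hconv : ∀ (st : List (List Int) × List Int × Nat), ∀ p ∈ List.range h_.toNat,
      (if ((0 : Int) + (p : Int)) % 2 == 0 then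
        (PySem.List.pyRange 0 w 1).foldl
          (fun st j => dcStep ((0 : Int) + (p : Int)).toNat j.toNat st) st
      else if ((0 : Int) + (p : Int)) % 2 == 1 then
        (PySem.List.pyRange 0 w 1).foldl
          (fun st j => dcStep ((0 : Int) + (p : Int)).toNat (w - j - 1).toNat st) st
      else st) = stepN w.toNat st p := by
    intro st p _
    have hpt : ((0 : Int) + (p : Int)).toNat = p := by omega
    rw [PySem.List.pyRange_one 0 w]
    simp only [Int.sub_zero]
    rw [List.foldl_map, List.foldl_map]
    have he : (fun (st : List (List Int) × List Int × Nat) (jj : Nat) =>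
        dcStep ((0 : Int) + (p : Int)).toNat ((0 : Int) + (jj : Int)).toNat st)
        = fun st jj => dcStep p jj st := by
      funext st jj
      rw [hpt, show ((0 : Int) + (jj : Int)).toNat = jj from by omega]
    have ho : (fun (st : List (List Int) × List Int × Nat) (jj : Nat) =>
        dcStep ((0 : Int) + (p : Int)).toNat (w - ((0 : Int) + (jj : Int)) - 1).toNat st)
        = fun st jj => dcStep p (w.toNat - jj - 1) st := by
      funext st jj
      rw [hpt, show (w - ((0 : Int) + (jj : Int)) - 1).toNat = w.toNat - jj - 1 from by omega]
    rw [he, ho, stepN]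
    by_cases hpar : p % 2 = 0
    · have h2 : ((0 : Int) + (p : Int)) % 2 = 0 := by omega
      rw [if_pos (show (((0 : Int) + (p : Int)) % 2 == 0) = true from by rw [h2]; rfl),
        if_pos hpar]
    · have h2 : ((0 : Int) + (p : Int)) % 2 = 1 := by omega
      rw [if_neg (show ¬ ((((0 : Int) + (p : Int)) % 2 == 0) = true) from by rw [h2]; decide),
        if_pos (show (((0 : Int) + (p : Int)) % 2 == 1) = true from by rw [h2]; rfl),
        if_neg hpar]
  rw [PySem.List.foldl_congr_mem _ _ (stepN w.toNat) _ hconv, hfold]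

-- a fold whose step ignores the element
theorem foldl_const {α β : Type} (l : List α) (st : β) :
    l.foldl (fun st _ => st) st = st := by
  induction l generalizing st with
  | nil => rfl
  | cons x xs ih => exact ih st

-- degenerate case: no cell is filled, A returns C unchanged
theorem portA_trivial (C : List (List Int)) (h_ w : Int) (A : List Int)
    (h : ¬ (0 < h_ ∧ 0 < w)) : determine_color C h_ w A = C := by
  unfold determine_color
  by_cases hh : 0 < h_
  · have hnil : PySem.List.pyRange 0 w 1 = [] := PySem.List.pyRange_one_eq_nil (by omega)
    have hstep : (fun (st : List (List Int) × List Int × Nat) (i : Int) =>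
        if i % 2 == 0 then
          (PySem.List.pyRange 0 w 1).foldl (fun st j => dcStep i.toNat j.toNat st) st
        else if i % 2 == 1 then
          (PySem.List.pyRange 0 w 1).foldl (fun st j => dcStep i.toNat (w - j - 1).toNat st) st
        else st) = fun st _ => st := by
      funext st i
      rw [hnil]
      simp only [List.foldl_nil]
      split
      · rfl
      · split <;> rfl
    rw [hstep, foldl_const]
  · have hnil : PySem.List.pyRange 0 h_ 1 = [] := PySem.List.pyRange_one_eq_nil (by omega)
    rw [hnil]
    rfl

-- ===== B-side lemmas =====

-- B's two loops, lets expanded (definitional)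
theorem altB_unfold (C : List (List Int)) (h_ w : Int) (A : List Int) :
    determine_color_alt C h_ w A
      = (PySem.List.enumerate
          (((PySem.List.pyRange 0 (h_ * w) 1).foldl (fun st _ => genStep st) ([], A, 0)).1)
          0).foldl (plStep w) C := rfl

-- pass 1 emits exactly the color stream and updates (A, k) like the abstract process
theorem genLoop (n : Nat) : ∀ (seq₀ A : List Int) (k : Nat),
    ∃ A', (List.range n).foldl (fun st _ => genStep st) (seq₀, A, k)
        = (seq₀ ++ stream (k, A.drop k) n, A', (afterS (k, A.drop k) n).1)
      ∧ A'.drop (afterS (k, A.drop k) n).1 = (afterS (k, A.drop k) n).2 := by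
  induction n with
  | zero =>
    intro seq₀ A k
    refine ⟨A, ?_, rfl⟩
    simp [stream, afterS]
  | succ n ih =>
    intro seq₀ A k
    obtain ⟨A₁, hfold, hdrop⟩ := ih seq₀ A k
    rw [List.range_succ, List.foldl_append, hfold]
    set σ := (k, A.drop k)
    have hpair : (((afterS σ n).1 : Nat), A₁.drop (afterS σ n).1) = afterS σ n := by
      rw [hdrop]
    obtain ⟨hk2, hd2⟩ := step_corr A₁ (afterS σ n).1
    rw [hpair] at hk2 hd2
    refine ⟨A₁.set (afterS σ n).1 (A₁.getD (afterS σ n).1 0 - 1), ?_, ?_⟩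
    · simp only [List.foldl_cons, List.foldl_nil, genStep]
      rw [List.append_assoc, ← stream_succ_right, hk2, ← afterS_succ_right]
    · rw [afterS_succ_right]
      exact hd2

-- Python's in-range nonnegative subscript assignment is List.set
theorem pySet2_pos (G : List (List Int)) (i col : Nat) (v : Int)
    (hi : i < G.length) (hc : col < (G.getD i []).length) :
    pySet2 G (i : Int) (col : Int) v = G.set i ((G.getD i []).set col v) := by
  simp only [pySet2]
  rw [if_neg (show ¬ ((i : Int) < 0) by omega)]
  rw [if_pos (show (0 : Int) ≤ (i : Int) ∧ (i : Int) < G.length by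
    constructor
    · omega
    · exact_mod_cast hi)]
  rw [Int.toNat_natCast]
  rw [if_neg (show ¬ ((col : Int) < 0) by omega)]
  rw [if_pos (show (0 : Int) ≤ (col : Int) ∧ (col : Int) < (G.getD i []).length by
    constructor
    · omega
    · exact_mod_cast hc)]
  rw [Int.toNat_natCast]

-- pass 2, even row m: cells m*wn .. m*wn+n-1 fill columns 0..n-1 left to right
theorem placeE (wn : Nat) (w : Int) (hw : w = (wn : Int)) (m : Nat) (hm : m % 2 = 0)
    (G : List (List Int)) (hi : m < G.length) (hrow : wn ≤ (G.getD m []).length)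
    (σ : Nat × List Int) :
    ∀ n, n ≤ wn →
    (PySem.List.enumerate (stream σ n) ((m * wn : Nat) : Int)).foldl (plStep w) G
      = G.set m (stream σ n ++ (G.getD m []).drop n) := by
  intro n
  induction n with
  | zero =>
    intro _
    rw [getD_of_lt G m [] hi]
    simp [stream]
  | succ n ih =>
    intro hn1
    have hwn : 0 < wn := by omega
    rw [stream_succ_right, PySem.List.enumerate_append, List.foldl_append, ih (by omega)]
    simp only [stream_length, PySem.List.enumerate_cons, PySem.List.enumerate_nil,
      List.foldl_cons, List.foldl_nil, plStep]
    rw [show ((m * wn : Nat) : Int) + (n : Int) = ((m * wn + n : Nat) : Int) from by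
      push_cast; ring]
    rw [hw, PySem.Int.floordiv_natCast, PySem.Int.mod_natCast,
      show (m * wn + n) / wn = m from by
        rw [Nat.mul_comm, Nat.mul_add_div hwn, Nat.div_eq_of_lt (by omega), Nat.add_zero],
      show (m * wn + n) % wn = n from by
        rw [Nat.mul_comm m wn, Nat.mul_add_mod, Nat.mod_eq_of_lt (by omega)]]
    rw [if_pos (show (((m : Int) % 2 == 0) = true) from by
      rw [show ((m : Int) % 2) = 0 from by omega]; rfl)]
    have hi' : m < (G.set m (stream σ n ++ (G.getD m []).drop n)).length := by
      simpa using hi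
    have hgd : (G.set m (stream σ n ++ (G.getD m []).drop n)).getD m []
        = stream σ n ++ (G.getD m []).drop n := by
      rw [getD_of_lt _ m [] hi']
      simp
    have hc' : n < ((G.set m (stream σ n ++ (G.getD m []).drop n)).getD m []).length := by
      rw [hgd, List.length_append, stream_length, List.length_drop]
      omega
    rw [pySet2_pos _ m n _ hi' hc', hgd, List.set_set]
    have hrowlen : n < (G.getD m []).length := by omega
    have hsetrow : (stream σ n ++ (G.getD m []).drop n).set n (((afterS σ n).1 : Int) + 1)
        = stream σ (n + 1) ++ (G.getD m []).drop (n + 1) := by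
      rw [List.set_append_right _ _ (by simp [stream_length]), stream_length, Nat.sub_self,
        List.drop_eq_getElem_cons hrowlen]
      simp only [List.set_cons_zero]
      rw [stream_succ_right, List.append_assoc, List.singleton_append]
    rw [hsetrow, stream_succ_right]

-- pass 2, odd row m: cells m*wn .. m*wn+n-1 fill columns wn-1 down to wn-n
theorem placeO (wn : Nat) (w : Int) (hw : w = (wn : Int)) (m : Nat) (hm : m % 2 = 1)
    (G : List (List Int)) (hi : m < G.length) (hrow : wn ≤ (G.getD m []).length)
    (σ : Nat × List Int) :
    ∀ n, n ≤ wn →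
    (PySem.List.enumerate (stream σ n) ((m * wn : Nat) : Int)).foldl (plStep w) G
      = G.set m ((G.getD m []).take (wn - n) ++ (stream σ n).reverse
          ++ (G.getD m []).drop wn) := by
  intro n
  induction n with
  | zero =>
    intro _
    rw [getD_of_lt G m [] hi]
    simp [stream, List.take_append_drop]
  | succ n ih =>
    intro hn1
    have hwn : 0 < wn := by omega
    rw [stream_succ_right, PySem.List.enumerate_append, List.foldl_append, ih (by omega)]
    simp only [stream_length, PySem.List.enumerate_cons, PySem.List.enumerate_nil,
      List.foldl_cons, List.foldl_nil, plStep]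
    rw [show ((m * wn : Nat) : Int) + (n : Int) = ((m * wn + n : Nat) : Int) from by
      push_cast; ring]
    rw [hw, PySem.Int.floordiv_natCast, PySem.Int.mod_natCast,
      show (m * wn + n) / wn = m from by
        rw [Nat.mul_comm, Nat.mul_add_div hwn, Nat.div_eq_of_lt (by omega), Nat.add_zero],
      show (m * wn + n) % wn = n from by
        rw [Nat.mul_comm m wn, Nat.mul_add_mod, Nat.mod_eq_of_lt (by omega)]]
    rw [if_neg (show ¬ (((m : Int) % 2 == 0) = true) from by
      rw [show ((m : Int) % 2) = 1 from by omega]; decide)]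
    rw [show (wn : Int) - 1 - (n : Int) = ((wn - n - 1 : Nat) : Int) from by omega]
    set row := G.getD m [] with hrowdef
    set R := row.take (wn - n) ++ (stream σ n).reverse ++ row.drop wn with hR
    have hi' : m < (G.set m R).length := by simpa using hi
    have hgd : (G.set m R).getD m [] = R := by
      rw [getD_of_lt _ m [] hi']
      simp
    have hc' : wn - n - 1 < ((G.set m R).getD m []).length := by
      rw [hgd, hR, List.length_append, List.length_append, List.length_take,
        List.length_reverse, stream_length, List.length_drop]
      omega
    rw [pySet2_pos _ m (wn - n - 1) _ hi' hc', hgd, List.set_set]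
    have hlen_take : (row.take (wn - n)).length = wn - n := by
      rw [List.length_take]; omega
    have hcol : wn - n - 1 < (row.take (wn - n)).length := by rw [hlen_take]; omega
    have hidx : wn - n - 1 < row.length := by omega
    have hsetrow : R.set (wn - n - 1) (((afterS σ n).1 : Int) + 1)
        = row.take (wn - (n + 1)) ++ (stream σ (n + 1)).reverse ++ row.drop wn := by
      rw [hR, List.append_assoc, List.set_append_left _ _ hcol]
      have htk : row.take (wn - n) = row.take (wn - n - 1) ++ [row[wn - n - 1]] := by
        have h1 := List.take_succ_eq_append_getElem (l := row) (i := wn - n - 1) hidx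
        rw [show wn - n - 1 + 1 = wn - n from by omega] at h1
        exact h1
      rw [htk, List.set_append_right _ _ (by rw [List.length_take]; omega),
        show wn - n - 1 - (row.take (wn - n - 1)).length = 0 from by
          rw [List.length_take]; omega]
      simp only [List.set_cons_zero]
      rw [stream_succ_right, List.reverse_append, List.reverse_singleton]
      simp [List.append_assoc, Nat.sub_sub]
    rw [hsetrow, stream_succ_right]

-- pass 2 row by row: placing the first m*wn colors yields the target grid up to row m
theorem placeRows (C : List (List Int)) (wn hn : Nat) (A : List Int) (w : Int)
    (hw : w = (wn : Int))
    (hC : hn ≤ C.length) (hrow : ∀ p, p < hn → wn ≤ (C.getD p []).length) :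
    ∀ m, m ≤ hn →
    (PySem.List.enumerate (stream (0, A) (m * wn)) 0).foldl (plStep w) C
      = gridT C wn A m := by
  intro m
  induction m with
  | zero =>
    intro _
    rw [Nat.zero_mul]
    rfl
  | succ m ih =>
    intro hm
    rw [Nat.succ_mul, stream_add, PySem.List.enumerate_append, List.foldl_append,
      ih (by omega), stream_length, zero_add]
    have hiG : m < (gridT C wn A m).length := by rw [gridT_length]; omega
    have hgd : (gridT C wn A m).getD m [] = C.getD m [] := gridT_getD_ge C wn A m m le_rfl
    have hrowG : wn ≤ ((gridT C wn A m).getD m []).length := by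
      rw [hgd]; exact hrow m (by omega)
    by_cases hpar : m % 2 = 0
    · rw [placeE wn w hw m hpar (gridT C wn A m) hiG hrowG _ wn le_rfl, gridT_succ]
      congr 1
      rw [rowT, if_pos hpar, hgd]
    · rw [placeO wn w hw m (by omega) (gridT C wn A m) hiG hrowG _ wn le_rfl, gridT_succ]
      congr 1
      rw [rowT, if_neg hpar, hgd, Nat.sub_self, List.take_zero, List.nil_append]

-- port B computes the target grid (positive case)
theorem portB_eq (C : List (List Int)) (h_ w : Int) (A : List Int)
    (hh : 0 < h_) (hwp : 0 < w)
    (hC : h_.toNat ≤ C.length) (hrow : ∀ p, p < h_.toNat → w.toNat ≤ (C.getD p []).length) :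
    determine_color_alt C h_ w A = gridT C w.toNat A h_.toNat := by
  set hn := h_.toNat with hhn
  set wn := w.toNat with hwn
  have hwe : w = (wn : Int) := by omega
  have hN : (h_ * w - 0).toNat = hn * wn := by
    rw [Int.sub_zero, show h_ = (hn : Int) from by omega, hwe, ← Nat.cast_mul,
      Int.toNat_natCast]
  rw [altB_unfold, PySem.List.pyRange_one 0 (h_ * w), hN, List.foldl_map]
  obtain ⟨A', hfold, -⟩ := genLoop (hn * wn) [] A 0
  rw [List.drop_zero] at hfold
  rw [hfold, List.nil_append]
  exact placeRows C wn hn A w hwe hC hrow hn le_rfl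

-- degenerate case: h*w ≤ 0, both passes are empty and B returns C unchanged
theorem portB_trivial (C : List (List Int)) (h_ w : Int) (A : List Int)
    (hcor : 0 ≤ h_ ∨ 0 ≤ w) (h : ¬ (0 < h_ ∧ 0 < w)) :
    determine_color_alt C h_ w A = C := by
  have hprod : h_ * w ≤ 0 := by
    rcases hcor with hc | hc
    · rcases lt_or_ge 0 h_ with h1 | h1
      · have h2 : w ≤ 0 := by omega
        nlinarith
      · have h3 : h_ = 0 := by omega
        rw [h3, zero_mul]
    · rcases lt_or_ge 0 w with h1 | h1
      · have h2 : h_ ≤ 0 := by omega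
        nlinarith
      · have h3 : w = 0 := by omega
        rw [h3, mul_zero]
  rw [altB_unfold, PySem.List.pyRange_one_eq_nil hprod]
  rfl

-- ===== VERDICT (by name: the statement is the Claim_ definition above) =====
theorem determine_color_spec : Claim_equal_determine_color := by
  intro C h_ w A _ hpre
  obtain ⟨hcor, hmain⟩ := hpre
  unfold Spec_determine_color
  by_cases hpos : 0 < h_ ∧ 0 < w
  · obtain ⟨hh, hwp⟩ := hpos
    obtain ⟨hC, hrowmem, -⟩ := hmain hh hwp
    have hrow : ∀ p, p < h_.toNat → w.toNat ≤ (C.getD p []).length := by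
      intro p hp
      have hpc : p < C.length := by omega
      rw [getD_of_lt C p [] hpc]
      apply hrowmem
      have hpt : p < (C.take h_.toNat).length := by
        rw [List.length_take]; omega
      have hmem := List.getElem_mem hpt
      rwa [List.getElem_take] at hmem
    rw [portA_eq C h_ w A hh hwp hC hrow, portB_eq C h_ w A hh hwp hC hrow]
  · rw [portA_trivial C h_ w A hpos, portB_trivial C h_ w A hcor hpos]
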